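-- pv_equiv track=rewrite | github.com/evanpdixon/rme-news-scout | digest.py | _group_by_topic
-- ===== SOURCE A (Python) =====
-- from collections import OrderedDict
--
-- TOPIC_ORDER = [
--     "RME Mention",
--     "Ham Radio",
--     "GMRS",
--     "Emergency Comms",
--     "Outages & Infrastructure",
--     "Preparedness & Off-Grid",
--     "FCC & Policy",
--     "FCC Enforcement",
--     "Other",
-- ]
--
-- def _group_by_topic(articles: list[dict]) -> OrderedDict:
--     """Group articles by topic category, sorted by score within each group."""
--     grouped = OrderedDict()
--     for topic in TOPIC_ORDER:
--         grouped[topic] = []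
--
--     for art in articles:
--         topic = art.get("topic", "Other")
--         if topic not in grouped:
--             grouped[topic] = []
--         grouped[topic].append(art)
--
--     # Sort each group by score descending
--     for topic in grouped:
--         grouped[topic].sort(key=lambda a: a.get("score", 0), reverse=True)
--
--     return grouped
-- ===== SOURCE B (Python) =====
-- from collections import OrderedDict
--
-- TOPIC_ORDER = [
--     "RME Mention",
--     "Ham Radio",
--     "GMRS",
--     "Emergency Comms",
--     "Outages & Infrastructure",
--     "Preparedness & Off-Grid",
--     "FCC & Policy",
--     "FCC Enforcement",
--     "Other",
-- ]
--
-- def _group_by_topic(articles):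
--     """Group articles by topic, keeping each group score-descending by ordered insertion (no sort call)."""
--     grouped = OrderedDict()
--     for topic in TOPIC_ORDER:
--         grouped[topic] = []
--     for art in articles:
--         g = grouped.setdefault(art.get("topic", "Other"), [])
--         k = art.get("score", 0)
--         i = 0
--         while i < len(g) and g[i].get("score", 0) >= k:
--             i += 1
--         g.insert(i, art)
--     return grouped
-- ===== Notes on version B (the rewrite author's own statement) =====
-- stated objective: alternative
-- what changed: A appends every article to its topic bucket and then sorts each bucket with list.sort(reverse=True); B never calls sort: it keeps each bucket score-descending all along by inserting every article at its stable position (after all entries with key >= its key) in the single grouping pass.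
import Mathlib
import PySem

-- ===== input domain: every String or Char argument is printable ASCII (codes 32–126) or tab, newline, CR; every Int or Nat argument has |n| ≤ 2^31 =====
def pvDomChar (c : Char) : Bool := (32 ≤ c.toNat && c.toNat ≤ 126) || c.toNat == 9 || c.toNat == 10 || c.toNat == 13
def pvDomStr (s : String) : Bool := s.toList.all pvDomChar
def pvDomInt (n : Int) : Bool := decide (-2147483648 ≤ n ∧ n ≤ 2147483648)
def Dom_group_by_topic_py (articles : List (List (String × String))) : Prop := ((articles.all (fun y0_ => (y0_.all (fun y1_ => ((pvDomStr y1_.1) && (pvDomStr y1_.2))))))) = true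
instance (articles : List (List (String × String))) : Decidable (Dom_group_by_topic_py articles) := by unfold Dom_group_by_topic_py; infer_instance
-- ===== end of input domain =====

-- B replaces A's append-everything-then-sort-each-group with a single pass that keeps every
-- group score-descending by ordered insertion (no sort call); equivalence of return values.

-- ===== PORT A =====
def pvTopicOrder : List String :=
  ["RME Mention", "Ham Radio", "GMRS", "Emergency Comms", "Outages & Infrastructure",
   "Preparedness & Off-Grid", "FCC & Policy", "FCC Enforcement", "Other"]

-- art.get(k, dflt) on the article dict (assoc list, first match — exact dict semantics)
def pvAGet (art : List (String × String)) (k dflt : String) : String :=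
  (PySem.Dict.mk art).getD k dflt

-- the sort key a.get("score", 0); values here are strings, and under Pre_ every group is
-- score-homogeneous, so the default "" (all keys equal, stable sort = identity) is exact
-- where Python's default 0 is (all keys equal there too)
def pvScoreKey (a : List (String × String)) : String := pvAGet a "score" ""

def group_by_topic_py (articles : List (List (String × String))) : List (String × List (List (String × String))) :=
  let grouped : PySem.Dict String (List (List (String × String))) :=
    pvTopicOrder.foldl (fun d t => d.insert t []) PySem.Dict.empty
  let grouped := articles.foldl (fun d art =>
      let topic := pvAGet art "topic" "Other"
      let d := if d.contains topic then d else d.insert topic []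
      d.modify topic [] (fun g => g ++ [art])) grouped
  -- final loop 'for topic in grouped: grouped[topic].sort(key=…, reverse=True)' = per-key
  -- in-place sort, i.e. a value map over the items
  grouped.items.map (fun p => (p.1, PySem.List.sorted p.2 pvScoreKey true))

-- ===== PORT B =====
-- the while loop 'i = 0; while i < len(g) and g[i].get("score", 0) >= k: i += 1; g.insert(i, art)'
def pvInsertDesc (art : List (String × String)) : List (List (String × String)) → List (List (String × String))
  | [] => [art]
  | y :: ys => if pvScoreKey art ≤ pvScoreKey y then y :: pvInsertDesc art ys else art :: y :: ys

def group_by_topic_py_alt (articles : List (List (String × String))) : List (String × List (List (String × String))) :=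
  let grouped : PySem.Dict String (List (List (String × String))) :=
    pvTopicOrder.foldl (fun d t => d.insert t []) PySem.Dict.empty
  let grouped := articles.foldl (fun d art =>
      -- g = grouped.setdefault(art.get("topic", "Other"), []); insert art into g in place
      d.modify (pvAGet art "topic" "Other") [] (fun g => pvInsertDesc art g)) grouped
  grouped.items

-- ===== PRECONDITION & SPEC =====
def pvHasScore (a : List (String × String)) : Bool := (PySem.Dict.mk a).contains "score"

-- Pre_ excludes exactly the inputs on which Python A raises TypeError: some topic group mixes
-- articles with and without a "score" key, so the sort compares str with the int default 0.
def Pre_group_by_topic_py (articles : List (List (String × String))) : Prop :=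
  ∀ a ∈ articles, ∀ b ∈ articles,
    pvAGet a "topic" "Other" = pvAGet b "topic" "Other" → pvHasScore a = pvHasScore b
instance (articles : List (List (String × String))) : Decidable (Pre_group_by_topic_py articles) := by unfold Pre_group_by_topic_py; infer_instance

def pvWitness_group_by_topic_py : (List (List (String × String))) :=
  ([[("topic", "Ham Radio"), ("score", "7")], [("score", "10")], [("topic", "Ham Radio"), ("score", "7")]])

def Spec_group_by_topic_py (articles : List (List (String × String))) (out : List (String × List (List (String × String)))) : Prop := out = group_by_topic_py_alt articles
instance (articles : List (List (String × String))) (out : List (String × List (List (String × String)))) : Decidable (Spec_group_by_topic_py articles out) := by unfold Spec_group_by_topic_py; infer_instance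

-- ===== CLAIM (what is proved, stated in full; the proofs are below) =====
def Claim_equal_group_by_topic_py : Prop := ∀ (articles : List (List (String × String))), Dom_group_by_topic_py articles → Pre_group_by_topic_py articles → Spec_group_by_topic_py articles (group_by_topic_py articles)

-- ===== LEMMAS AND PROOFS =====

-- map applied to items: pair ↦ (key, group sorted score-descending)
def pvF (p : String × List (List (String × String))) : String × List (List (String × String)) :=
  (p.1, PySem.List.sorted p.2 pvScoreKey true)

theorem pvInsertDesc_eq (art : List (String × String)) (l : List (List (String × String))) :
    pvInsertDesc art l =
      PySem.List.insertBy (fun a b => decide (pvScoreKey b < pvScoreKey a)) art l := by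
  induction l with
  | nil => rfl
  | cons y ys ih =>
      simp only [pvInsertDesc, PySem.List.insertBy]
      by_cases h : pvScoreKey y < pvScoreKey art
      · simp [h, not_le.mpr h]
      · simp [h, not_lt.mp h, ih]

theorem pvSorted_snoc (g : List (List (String × String))) (a : List (String × String)) :
    PySem.List.sorted (g ++ [a]) pvScoreKey true =
      pvInsertDesc a (PySem.List.sorted g pvScoreKey true) := by
  rw [pvInsertDesc_eq, PySem.List.sorted_rev_eq_foldl_insertBy, PySem.List.sorted_rev_eq_foldl_insertBy,
    List.foldl_append]
  rfl

theorem pvGet?_mk_map (l : List (String × List (List (String × String)))) (k : String) :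
    (PySem.Dict.mk (l.map pvF)).get? k =
      ((PySem.Dict.mk l).get? k).map (fun v => PySem.List.sorted v pvScoreKey true) := by
  have hfind : (l.map pvF).find? (fun p => p.1 == k) = (l.find? (fun p => p.1 == k)).map pvF := by
    rw [List.find?_map]
    rfl
  show Option.map _ (List.find? _ (l.map pvF)) = _
  rw [hfind]
  cases hl : List.find? (fun p => p.1 == k) l <;> simp [PySem.Dict.get?, hl, pvF]

theorem pvContains_mk_map (l : List (String × List (List (String × String)))) (k : String) :
    (PySem.Dict.mk (l.map pvF)).contains k = (PySem.Dict.mk l).contains k := by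
  rw [PySem.Dict.contains_eq_isSome_get?, PySem.Dict.contains_eq_isSome_get?, pvGet?_mk_map]
  cases (PySem.Dict.mk l).get? k <;> rfl

theorem pvGetD_mk_map (l : List (String × List (List (String × String)))) (k : String) :
    (PySem.Dict.mk (l.map pvF)).getD k [] =
      PySem.List.sorted ((PySem.Dict.mk l).getD k []) pvScoreKey true := by
  unfold PySem.Dict.getD
  rw [pvGet?_mk_map]
  cases (PySem.Dict.mk l).get? k <;> rfl

-- A's loop body, simplified to one unconditional insert
theorem pvStepA_eq (d : PySem.Dict String (List (List (String × String)))) (t : String)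
    (art : List (String × String)) :
    (if d.contains t then d else d.insert t []).modify t [] (fun g => g ++ [art]) =
      d.insert t (d.getD t [] ++ [art]) := by
  by_cases h : d.contains t = true
  · simp [h, PySem.Dict.modify]
  · have h' : d.contains t = false := by simpa using h
    simp only [h, Bool.false_eq_true, if_neg, not_false_iff, PySem.Dict.modify]
    rw [PySem.Dict.getD_insert_self, PySem.Dict.insert_insert_self,
      PySem.Dict.getD_of_not_contains d [] h']

-- one step preserves 'B's dict = A's dict with every group sorted'
theorem pvStep_rel (l : List (String × List (List (String × String)))) (art : List (String × String)) :
    (PySem.Dict.mk (l.map pvF)).modify (pvAGet art "topic" "Other") [] (fun g => pvInsertDesc art g) =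
      PySem.Dict.mk ((((PySem.Dict.mk l).insert (pvAGet art "topic" "Other")
        ((PySem.Dict.mk l).getD (pvAGet art "topic" "Other") [] ++ [art])).items).map pvF) := by
  set t := pvAGet art "topic" "Other" with ht
  set g := (PySem.Dict.mk l).getD t [] with hg
  have hv : pvInsertDesc art ((PySem.Dict.mk (l.map pvF)).getD t []) =
      PySem.List.sorted (g ++ [art]) pvScoreKey true := by
    rw [pvGetD_mk_map, pvSorted_snoc]
  unfold PySem.Dict.modify
  simp only [hv]
  apply PySem.Dict.ext
  rw [PySem.Dict.items_insert, PySem.Dict.items_insert, pvContains_mk_map]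
  by_cases h : (PySem.Dict.mk l).contains t = true
  · simp only [h, if_pos]
    show _ = (List.map _ _).map pvF
    rw [List.map_map, List.map_map]
    apply List.map_congr_left
    intro p _
    by_cases hp : (p.1 == t) = true
    · simp [Function.comp, hp, pvF]
    · simp [Function.comp, hp, pvF]
  · simp only [h, Bool.false_eq_true, if_neg, not_false_iff]
    simp [pvF]

-- the whole fold preserves the relation
theorem pvFold_rel (arts : List (List (String × String)))
    (l : List (String × List (List (String × String)))) :
    (arts.foldl (fun d art =>
        d.modify (pvAGet art "topic" "Other") [] (fun g => pvInsertDesc art g))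
      (PySem.Dict.mk (l.map pvF))).items =
    ((arts.foldl (fun d art =>
        let topic := pvAGet art "topic" "Other"
        let d := if d.contains topic then d else d.insert topic []
        d.modify topic [] (fun g => g ++ [art])) (PySem.Dict.mk l)).items).map pvF := by
  induction arts generalizing l with
  | nil => simp
  | cons art rest ih =>
      simp only [List.foldl_cons]
      rw [pvStepA_eq, pvStep_rel, ih]

-- the seeded dict has only empty groups, so it is its own sorted image
theorem pvSeed_map :
    (pvTopicOrder.foldl (fun d t => d.insert t []) PySem.Dict.empty
      : PySem.Dict String (List (List (String × String)))) =
    PySem.Dict.mk (((pvTopicOrder.foldl (fun d t => d.insert t []) PySem.Dict.empty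
      : PySem.Dict String (List (List (String × String)))).items).map pvF) := by
  decide

-- ===== VERDICT (by name: the statement is the Claim_ definition above) =====
theorem group_by_topic_py_spec : Claim_equal_group_by_topic_py := by
  intro articles _ _
  show group_by_topic_py articles = group_by_topic_py_alt articles
  unfold group_by_topic_py group_by_topic_py_alt
  simp only []
  rw [pvSeed_map, pvFold_rel]
  rfl
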